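-- pv_equiv track=rewrite | github.com/rushwing/mfg-project-lifecycle | scripts/bootstrap_templates.py | derive_production_stages
-- ===== SOURCE A (Python) =====
-- _STATION_TO_STAGE: dict[str, str | None] = {
--     "ICT": "SMT",
--     "FCT": "FATP",
--     "DIAG": "FATP",
--     "BURN-IN": "FATP",
--     "ATE": "FATP",
--     "SYSTEM": "FATP",
--     "OBA": "PACK",
--     "SFC": None,       # spans all stages
--     "Universal": None, # stage-agnostic
-- }
--
-- def derive_production_stages(test_stations: list[str]) -> list[str]:
--     """Map test_stations to production stages. SFC and Universal → All."""
--     if not test_stations or any(s in test_stations for s in ("Universal", "SFC")):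
--         return ["All"]
--     seen: list[str] = []
--     for stage in ("SMT", "FATP", "PACK"):
--         if any(_STATION_TO_STAGE.get(s) == stage for s in test_stations):
--             seen.append(stage)
--     return seen if seen else ["All"]
-- ===== SOURCE B (Python) =====
-- _STATION_TO_STAGE: dict[str, str | None] = {
--     "ICT": "SMT",
--     "FCT": "FATP",
--     "DIAG": "FATP",
--     "BURN-IN": "FATP",
--     "ATE": "FATP",
--     "SYSTEM": "FATP",
--     "OBA": "PACK",
--     "SFC": None,
--     "Universal": None,
-- }
--
-- def derive_production_stages(test_stations: list[str]) -> list[str]: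
--     """Map test_stations to production stages. SFC and Universal -> All."""
--     if not test_stations:
--         return ["All"]
--     smt = fatp = pack = False
--     for s in test_stations:
--         if s == "Universal" or s == "SFC":
--             return ["All"]
--         stage = _STATION_TO_STAGE.get(s)
--         if stage == "SMT":
--             smt = True
--         elif stage == "FATP":
--             fatp = True
--         elif stage == "PACK":
--             pack = True
--     seen = (["SMT"] if smt else []) + (["FATP"] if fatp else []) + (["PACK"] if pack else [])
--     return seen if seen else ["All"]
-- ===== Notes on version B (the rewrite author's own statement) =====
-- stated objective: faster
-- what changed: Single left-to-right pass accumulating three boolean stage flags with an early return on Universal/SFC, instead of A's separate guard scan plus three per-stage rescans of the whole list.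
import Mathlib
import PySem

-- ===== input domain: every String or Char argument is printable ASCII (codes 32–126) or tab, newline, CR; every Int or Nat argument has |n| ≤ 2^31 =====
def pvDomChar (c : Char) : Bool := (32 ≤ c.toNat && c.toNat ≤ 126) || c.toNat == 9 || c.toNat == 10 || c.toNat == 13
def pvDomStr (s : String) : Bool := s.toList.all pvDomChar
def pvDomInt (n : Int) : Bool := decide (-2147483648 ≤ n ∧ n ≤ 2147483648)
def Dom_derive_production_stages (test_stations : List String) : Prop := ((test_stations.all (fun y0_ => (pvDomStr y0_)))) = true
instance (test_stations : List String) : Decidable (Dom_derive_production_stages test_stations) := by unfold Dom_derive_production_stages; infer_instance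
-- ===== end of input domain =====

-- B makes one pass over test_stations accumulating three boolean stage flags (early return on
-- Universal/SFC) instead of A's guard scan plus three per-stage rescans; objective: faster (one pass).


-- ===== PORT A =====
-- shared module-level constant _STATION_TO_STAGE
def pvStationToStage : PySem.Dict String (Option String) :=
  PySem.Dict.ofList [("ICT", some "SMT"), ("FCT", some "FATP"), ("DIAG", some "FATP"),
    ("BURN-IN", some "FATP"), ("ATE", some "FATP"), ("SYSTEM", some "FATP"),
    ("OBA", some "PACK"), ("SFC", none), ("Universal", none)]

def derive_production_stages (test_stations : List String) : List String :=
  if test_stations.isEmpty || ["Universal", "SFC"].any (fun s => test_stations.contains s) then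
    ["All"]
  else
    let seen := ["SMT", "FATP", "PACK"].foldl (fun seen stage =>
      if test_stations.any (fun s => pvStationToStage.getD s none == some stage)
      then seen ++ [stage] else seen) []
    if seen.isEmpty then ["All"] else seen

-- ===== PORT B =====
-- the for-loop of Source B: three flag accumulators, `none` models the early `return ["All"]`
def pvFlagsLoop : List String → Bool → Bool → Bool → Option (Bool × Bool × Bool)
  | [], smt, fatp, pack => some (smt, fatp, pack)
  | s :: rest, smt, fatp, pack =>
    if s == "Universal" || s == "SFC" then none
    else
      let stage := pvStationToStage.getD s none
      if stage == some "SMT" then pvFlagsLoop rest true fatp pack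
      else if stage == some "FATP" then pvFlagsLoop rest smt true pack
      else if stage == some "PACK" then pvFlagsLoop rest smt fatp true
      else pvFlagsLoop rest smt fatp pack

def derive_production_stages_alt (test_stations : List String) : List String :=
  if test_stations.isEmpty then ["All"]
  else
    match pvFlagsLoop test_stations false false false with
    | none => ["All"]
    | some (smt, fatp, pack) =>
      let seen := (if smt then ["SMT"] else []) ++ (if fatp then ["FATP"] else [])
                    ++ (if pack then ["PACK"] else [])
      if seen.isEmpty then ["All"] else seen

-- ===== PRECONDITION & SPEC =====
def Spec_derive_production_stages (test_stations : List String) (out : List String) : Prop := out = derive_production_stages_alt test_stations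
instance (test_stations : List String) (out : List String) : Decidable (Spec_derive_production_stages test_stations out) := by unfold Spec_derive_production_stages; infer_instance

-- ===== CLAIM (what is proved, stated in full; the proofs are below) =====
def Claim_equal_derive_production_stages : Prop := ∀ (test_stations : List String), Dom_derive_production_stages test_stations → Spec_derive_production_stages test_stations (derive_production_stages test_stations)

-- ===== LEMMAS AND PROOFS =====
lemma pvFlagsLoop_none_iff (ts : List String) : ∀ a b c,
    pvFlagsLoop ts a b c = none ↔ ts.any (fun s => s == "Universal" || s == "SFC") = true := by
  induction ts with
  | nil => simp [pvFlagsLoop]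
  | cons s rest ih =>
    intro a b c
    by_cases h : (s == "Universal" || s == "SFC") = true
    · simp [pvFlagsLoop, h]
    · simp only [Bool.not_eq_true] at h
      simp only [pvFlagsLoop, h, Bool.false_eq_true, if_false, List.any_cons, Bool.false_or]
      split_ifs <;> exact ih _ _ _

lemma pvFlagsLoop_some (ts : List String) :
    ts.any (fun s => s == "Universal" || s == "SFC") = false → ∀ a b c,
    pvFlagsLoop ts a b c =
      some (a || ts.any (fun s => pvStationToStage.getD s none == some "SMT"),
            b || ts.any (fun s => pvStationToStage.getD s none == some "FATP"),
            c || ts.any (fun s => pvStationToStage.getD s none == some "PACK")) := by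
  induction ts with
  | nil => simp [pvFlagsLoop]
  | cons s rest ih =>
    intro hok a b c
    simp only [List.any_cons, Bool.or_eq_false_iff] at hok
    have hs : (s == "Universal" || s == "SFC") = false := by
      simp [hok.1.1, hok.1.2]
    have hrest := hok.2
    simp only [pvFlagsLoop, hs, List.any_cons]
    rw [if_neg (by simp)]
    split_ifs with h1 h2 h3
    · rw [ih hrest]; simp [eq_of_beq h1]
    · simp only [Bool.not_eq_true] at h1
      rw [ih hrest]; simp [eq_of_beq h2]
    · simp only [Bool.not_eq_true] at h1 h2
      rw [ih hrest]; simp [eq_of_beq h3]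
    · simp only [Bool.not_eq_true] at h1 h2 h3
      rw [ih hrest]; simp [h1, h2, h3]

-- the guard conditions of A and B agree
lemma guard_eq (ts : List String) :
    (["Universal", "SFC"].any (fun s => ts.contains s))
      = ts.any (fun s => s == "Universal" || s == "SFC") := by
  rw [Bool.eq_iff_iff]
  simp only [List.any_cons, List.any_nil, Bool.or_false, Bool.or_eq_true,
    List.contains_iff_mem, List.any_eq_true, beq_iff_eq]
  constructor
  · rintro (h | h)
    · exact ⟨_, h, Or.inl rfl⟩
    · exact ⟨_, h, Or.inr rfl⟩
  · rintro ⟨x, hx, rfl | rfl⟩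
    · exact Or.inl hx
    · exact Or.inr hx

-- ===== VERDICT (by name: the statement is the Claim_ definition above) =====
theorem derive_production_stages_spec : Claim_equal_derive_production_stages := by
  intro ts _
  unfold Spec_derive_production_stages derive_production_stages derive_production_stages_alt
  by_cases he : ts.isEmpty = true
  · simp [he]
  · rw [guard_eq, if_neg he]
    by_cases hg : ts.any (fun s => s == "Universal" || s == "SFC") = true
    · rw [if_pos (by simp [hg]), (pvFlagsLoop_none_iff ts false false false).2 hg]
    · simp only [Bool.not_eq_true] at hg
      rw [if_neg (by simp [he, hg]), pvFlagsLoop_some ts hg false false false]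
      simp only [Bool.false_or, List.foldl, List.nil_append]
      cases ts.any (fun s => pvStationToStage.getD s none == some "SMT") <;>
        cases ts.any (fun s => pvStationToStage.getD s none == some "FATP") <;>
        cases ts.any (fun s => pvStationToStage.getD s none == some "PACK") <;> simp
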